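-- pv_equiv track=rewrite | github.com/jwgit12/DW_THI_Project | src/dw_thi/evaluate.py | _expand_subjects
-- ===== SOURCE A (Python) =====
-- def _expand_subjects(subject_ids: list[str] | None, all_keys: list[str]) -> list[str]:
--     if not subject_ids:
--         return []
--     subjects = []
--     seen = set()
--     for subject_id in subject_ids:
--         if subject_id in all_keys:
--             matches = [subject_id]
--         else:
--             matches = [k for k in all_keys if k.rsplit("_ses-", 1)[0] == subject_id]
--         for match in matches:
--             if match not in seen:
--                 seen.add(match)
--                 subjects.append(match)
--     return subjects
-- ===== SOURCE B (Python) =====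
-- def _expand_subjects(subject_ids, all_keys):
--     if not subject_ids:
--         return []
--     key_set = set(all_keys)
--     by_prefix = {}
--     for k in all_keys:
--         by_prefix.setdefault(k.rsplit("_ses-", 1)[0], []).append(k)
--     candidates = [m for sid in subject_ids
--                   for m in ([sid] if sid in key_set else by_prefix.get(sid, []))]
--     return list(dict.fromkeys(candidates))
-- ===== Notes on version B (the rewrite author's own statement) =====
-- stated objective: faster
-- what changed: B precomputes a key set and a prefix->keys dict once (A rescans all_keys per subject id), then works in staged passes: flatten all matches into one candidate list and deduplicate it in a single final pass, instead of A's online seen-set bookkeeping inside nested loops.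
import Mathlib
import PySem

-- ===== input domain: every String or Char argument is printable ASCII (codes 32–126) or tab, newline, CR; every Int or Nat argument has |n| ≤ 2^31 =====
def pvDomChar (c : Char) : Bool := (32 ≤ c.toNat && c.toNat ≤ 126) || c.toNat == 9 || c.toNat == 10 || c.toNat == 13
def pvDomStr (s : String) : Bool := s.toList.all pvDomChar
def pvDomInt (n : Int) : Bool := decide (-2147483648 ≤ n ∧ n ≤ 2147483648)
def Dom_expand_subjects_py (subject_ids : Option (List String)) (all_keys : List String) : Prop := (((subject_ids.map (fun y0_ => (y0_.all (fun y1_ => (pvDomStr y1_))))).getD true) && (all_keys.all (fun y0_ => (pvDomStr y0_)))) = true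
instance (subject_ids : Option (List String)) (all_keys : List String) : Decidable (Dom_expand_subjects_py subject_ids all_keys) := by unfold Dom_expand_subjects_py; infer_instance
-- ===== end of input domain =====

-- B precomputes a key set and a prefix→keys dict, flattens all matches, and deduplicates once at the end (asymptotically faster than A's per-subject scans).

-- shared helper: k.rsplit("_ses-", 1)[0], ported by hand via rfind + slice (exact: the part
-- before the LAST occurrence of "_ses-", or the whole string when the separator is absent)
def sesPrefix (k : String) : String :=
  let i := PySem.Str.rfind k "_ses-"
  if i < 0 then k else PySem.Str.slice k none (some i)

-- ===== PORT A =====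
def expand_subjects_py (subject_ids : Option (List String)) (all_keys : List String) : List String :=
  match subject_ids with
  | none => []
  | some sids =>
    if sids = [] then []
    else
      (sids.foldl (fun (st : List String × PySem.Set String) subject_id =>
        let ms :=
          if all_keys.contains subject_id then [subject_id]
          else all_keys.filter (fun k => sesPrefix k == subject_id)
        ms.foldl (fun st m =>
          if st.2.contains m then st else (st.1 ++ [m], st.2.add m)) st)
        ([], PySem.Set.empty)).1

-- ===== PORT B =====
-- list(dict.fromkeys(..)): keep the first occurrence of each element, in order
def dedupFirst (seen : PySem.Set String) : List String → List String
  | [] => []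
  | x :: rest =>
    if seen.contains x then dedupFirst seen rest
    else x :: dedupFirst (seen.add x) rest

def expand_subjects_py_alt (subject_ids : Option (List String)) (all_keys : List String) : List String :=
  match subject_ids with
  | none => []
  | some sids =>
    if sids = [] then []
    else
      let keySet := PySem.Set.ofList all_keys
      let byPrefix := all_keys.foldl
        (fun (d : PySem.Dict String (List String)) k =>
          d.modify (sesPrefix k) [] (· ++ [k])) PySem.Dict.empty
      let candidates := sids.flatMap (fun sid =>
        if keySet.contains sid then [sid] else byPrefix.getD sid [])
      dedupFirst PySem.Set.empty candidates

-- ===== PRECONDITION & SPEC =====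
def Spec_expand_subjects_py (subject_ids : Option (List String)) (all_keys : List String) (out : List String) : Prop := out = expand_subjects_py_alt subject_ids all_keys
instance (subject_ids : Option (List String)) (all_keys : List String) (out : List String) : Decidable (Spec_expand_subjects_py subject_ids all_keys out) := by unfold Spec_expand_subjects_py; infer_instance

-- ===== CLAIM (what is proved, stated in full; the proofs are below) =====
def Claim_equal_expand_subjects_py : Prop := ∀ (subject_ids : Option (List String)) (all_keys : List String), Dom_expand_subjects_py subject_ids all_keys → Spec_expand_subjects_py subject_ids all_keys (expand_subjects_py subject_ids all_keys)

-- ===== LEMMAS AND PROOFS =====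

-- the grouping dict answers exactly A's inner filter
theorem getD_byPrefix (all_keys : List String) (sid : String) :
    (all_keys.foldl
        (fun (d : PySem.Dict String (List String)) k =>
          d.modify (sesPrefix k) [] (· ++ [k])) PySem.Dict.empty).getD sid []
      = all_keys.filter (fun k => sesPrefix k == sid) := by
  have h : all_keys.foldl
        (fun (d : PySem.Dict String (List String)) k =>
          d.modify (sesPrefix k) [] (· ++ [k])) PySem.Dict.empty
      = (all_keys.map (fun k => (sesPrefix k, k))).foldl
        (fun d p => d.modify p.1 [] (· ++ [p.2])) PySem.Dict.empty := by
    rw [List.foldl_map]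
  rw [h, PySem.Dict.getD_foldl_modify_append]
  simp [List.filter_map, Function.comp_def]

-- the set answers exactly A's list-membership test
theorem contains_keySet (all_keys : List String) (sid : String) :
    PySem.Set.contains (PySem.Set.ofList all_keys) sid = all_keys.contains sid := by
  simp [PySem.Set.contains, PySem.Set.mem_ofList]

-- A's outer fold of inner folds is one fold over the flattened candidate list
theorem foldl_flatMap_eq {α β : Type} (g : α → List β)
    (f : List β × PySem.Set β → β → List β × PySem.Set β) :
    ∀ (sids : List α) (st : List β × PySem.Set β),
      sids.foldl (fun st sid => (g sid).foldl f st) st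
        = (sids.flatMap g).foldl f st := by
  intro sids
  induction sids with
  | nil => intro st; rfl
  | cons a rest ih =>
    intro st
    simp [List.flatMap_cons, List.foldl_append, ih]

-- A's online seen-set fold computes acc ++ one final dedupe pass
theorem foldl_dedup_eq (xs : List String) :
    ∀ (acc : List String) (s : PySem.Set String),
      (xs.foldl (fun (st : List String × PySem.Set String) m =>
        if st.2.contains m then st else (st.1 ++ [m], st.2.add m)) (acc, s)).1
        = acc ++ dedupFirst s xs := by
  induction xs with
  | nil => intro acc s; simp [dedupFirst]
  | cons x rest ih =>
    intro acc s
    simp only [List.foldl_cons, dedupFirst]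
    by_cases h : PySem.Set.contains s x = true
    · rw [if_pos h, if_pos h]
      exact ih acc s
    · rw [if_neg h, if_neg h]
      rw [ih (acc ++ [x]) (s.add x)]
      simp

-- ===== VERDICT (by name: the statement is the Claim_ definition above) =====
theorem expand_subjects_py_spec : Claim_equal_expand_subjects_py := by
  intro subject_ids all_keys _
  unfold Spec_expand_subjects_py expand_subjects_py expand_subjects_py_alt
  match subject_ids with
  | none => rfl
  | some sids =>
    by_cases h : sids = []
    · simp [h]
    · simp only [if_neg h]
      have hg : (fun sid =>
          if PySem.Set.contains (PySem.Set.ofList all_keys) sid then [sid]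
          else (all_keys.foldl
            (fun (d : PySem.Dict String (List String)) k =>
              d.modify (sesPrefix k) [] (· ++ [k])) PySem.Dict.empty).getD sid [])
          = (fun sid =>
          if all_keys.contains sid then [sid]
          else all_keys.filter (fun k => sesPrefix k == sid)) := by
        funext sid
        rw [contains_keySet, getD_byPrefix]
      rw [foldl_flatMap_eq, foldl_dedup_eq, hg]
      simp
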